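-- pv_equiv track=rewrite | github.com/joyshmitz/frankenmermaid | scripts/showcase_harness.py | parse_headers_manifest
-- ===== SOURCE A (Python) =====
-- def parse_headers_manifest(text: str) -> dict[str, dict[str, str]]:
--     rules: dict[str, dict[str, str]] = {}
--     current_rule: str | None = None
--
--     for raw_line in text.splitlines():
--         if not raw_line.strip():
--             continue
--
--         if raw_line.startswith((" ", "\t")):
--             if current_rule is None:
--                 raise RuntimeError("header line appeared before any route rule")
--             name, separator, value = raw_line.strip().partition(":")
--             if separator != ":":
--                 raise RuntimeError(f"invalid header line: {raw_line.strip()}")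
--             rules[current_rule][name.strip().lower()] = value.strip()
--             continue
--
--         current_rule = raw_line.strip()
--         rules[current_rule] = {}
--
--     return rules
-- ===== SOURCE B (Python) =====
-- def parse_headers_manifest(text: str) -> dict[str, dict[str, str]]:
--     # Pass 1: partition non-blank lines into ordered blocks (rule name, header lines).
--     blocks: list[tuple[str, list[str]]] = []
--     for raw_line in text.splitlines():
--         stripped = raw_line.strip()
--         if not stripped:
--             continue
--         if raw_line.startswith((" ", "\t")):
--             if not blocks:
--                 raise RuntimeError("header line appeared before any route rule")
--             blocks[-1][1].append(stripped)
--         else: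
--             blocks.append((stripped, []))
--
--     # Pass 2: turn each block into a rule entry (later duplicate rule names overwrite).
--     rules: dict[str, dict[str, str]] = {}
--     for name, headers in blocks:
--         entry: dict[str, str] = {}
--         for header in headers:
--             key, separator, value = header.partition(":")
--             if separator != ":":
--                 raise RuntimeError(f"invalid header line: {header}")
--             entry[key.strip().lower()] = value.strip()
--         rules[name] = entry
--     return rules
-- ===== Notes on version B (the rewrite author's own statement) =====
-- stated objective: alternative
-- what changed: A builds the nested dict in a single pass keyed by a current-rule cursor; B first partitions the non-blank lines into ordered (rule, header-lines) blocks and then assembles each block's header dict in a second pass.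
import Mathlib
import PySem

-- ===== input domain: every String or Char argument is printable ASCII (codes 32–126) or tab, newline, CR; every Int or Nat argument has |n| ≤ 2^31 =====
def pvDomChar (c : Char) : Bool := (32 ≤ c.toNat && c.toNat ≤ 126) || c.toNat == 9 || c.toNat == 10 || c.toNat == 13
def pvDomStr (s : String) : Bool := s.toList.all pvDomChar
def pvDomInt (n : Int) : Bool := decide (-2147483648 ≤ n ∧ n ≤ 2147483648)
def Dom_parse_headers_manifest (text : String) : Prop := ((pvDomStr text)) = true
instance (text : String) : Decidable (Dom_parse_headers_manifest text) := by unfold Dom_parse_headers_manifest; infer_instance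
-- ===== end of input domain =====

-- B re-implements A's one-pass cursor parse as a two-pass block partition + assembly; return values proved equal wherever A returns.


-- shared helper: s.partition(":") restricted to what both Pythons use — none iff the separator is absent (Python raises there)
def pmPartition (s : String) : Option (String × String) :=
  let i := PySem.Str.find s ":"
  if i = -1 then none
  else some (PySem.Str.slice s none (some i), PySem.Str.slice s (some (i + 1)) none)

def pmIndented (raw : String) : Bool :=
  PySem.Str.startswith raw " " || PySem.Str.startswith raw "\t"

-- ===== PORT A =====
-- one pass: dict of rules plus the current-rule cursor
def pmA_step (st : PySem.Dict String (PySem.Dict String String) × Option String)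
    (raw : String) : PySem.Dict String (PySem.Dict String String) × Option String :=
  if PySem.Str.strip raw = "" then st
  else if pmIndented raw then
    match st.2 with
    | none => st      -- Python: RuntimeError "header line appeared before any route rule" (outside Pre_)
    | some cr =>
      match pmPartition (PySem.Str.strip raw) with
      | none => st    -- Python: RuntimeError "invalid header line" (outside Pre_)
      | some (name, value) =>
        (st.1.modify cr PySem.Dict.empty
          (fun d => d.insert (PySem.Str.lower (PySem.Str.strip name)) (PySem.Str.strip value)), st.2)
  else
    (st.1.insert (PySem.Str.strip raw) PySem.Dict.empty, some (PySem.Str.strip raw))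

def parse_headers_manifest (text : String) : List (String × List (String × String)) :=
  let st := (PySem.Str.splitlines text).foldl pmA_step (PySem.Dict.empty, none)
  st.1.items.map (fun p => (p.1, p.2.items))

-- ===== PORT B =====
-- pass 1: partition the non-blank lines into ordered blocks (rule name, stripped header lines)
def pmB_addLast : List (String × List String) → String → List (String × List String)
  | [], _ => []      -- Python: RuntimeError "header line appeared before any route rule" (outside Pre_)
  | [(n, hs)], h => [(n, hs ++ [h])]
  | b :: rest, h => b :: pmB_addLast rest h

def pmB_blockStep (blocks : List (String × List String)) (raw : String) :
    List (String × List String) :=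
  let s := PySem.Str.strip raw
  if s = "" then blocks
  else if pmIndented raw then pmB_addLast blocks s
  else blocks ++ [(s, [])]

-- pass 2: turn one block's header lines into its dict
def pmB_mkHeaders (hs : List String) : PySem.Dict String String :=
  hs.foldl (fun d h =>
    match pmPartition h with
    | none => d      -- Python: RuntimeError "invalid header line" (outside Pre_)
    | some (k, v) => d.insert (PySem.Str.lower (PySem.Str.strip k)) (PySem.Str.strip v))
    PySem.Dict.empty

def parse_headers_manifest_alt (text : String) : List (String × List (String × String)) :=
  let blocks := (PySem.Str.splitlines text).foldl pmB_blockStep []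
  let rules := blocks.foldl (fun r b => r.insert b.1 (pmB_mkHeaders b.2)) PySem.Dict.empty
  rules.items.map (fun p => (p.1, p.2.items))

-- ===== PRECONDITION & SPEC =====
-- Pre_ excludes exactly the inputs where Python A raises RuntimeError: a non-blank indented line
-- before any rule line, or a non-blank indented line whose stripped text has no ':'.
def Pre_parse_headers_manifest (text : String) : Prop :=
  (∀ l, (((PySem.Str.splitlines text).filter (fun l => PySem.Str.strip l ≠ "")).head? = some l) →
      pmIndented l = false) ∧
  (∀ l ∈ (PySem.Str.splitlines text).filter (fun l => PySem.Str.strip l ≠ ""),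
      pmIndented l = true → PySem.Str.isIn ":" (PySem.Str.strip l) = true)
instance (text : String) : Decidable (Pre_parse_headers_manifest text) := by
  unfold Pre_parse_headers_manifest; infer_instance

def pvWitness_parse_headers_manifest : String :=
  "alpha\n host: example.com\n\tX-Key : v1 \n\nalpha\nbeta\n  accept: */*\n"

def Spec_parse_headers_manifest (text : String) (out : List (String × List (String × String))) : Prop := out = parse_headers_manifest_alt text
instance (text : String) (out : List (String × List (String × String))) : Decidable (Spec_parse_headers_manifest text out) := by unfold Spec_parse_headers_manifest; infer_instance

-- ===== CLAIM (what is proved, stated in full; the proofs are below) =====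
def Claim_equal_parse_headers_manifest : Prop := ∀ (text : String), Dom_parse_headers_manifest text → Pre_parse_headers_manifest text → Spec_parse_headers_manifest text (parse_headers_manifest text)

-- ===== LEMMAS AND PROOFS =====

-- B-side assembly of a block list starting from an arbitrary dict (pass 2, generalized)
def pmAssemble (r : PySem.Dict String (PySem.Dict String String))
    (bs : List (String × List String)) : PySem.Dict String (PySem.Dict String String) :=
  bs.foldl (fun r b => r.insert b.1 (pmB_mkHeaders b.2)) r

def pmLastName (bs : List (String × List String)) : Option String := bs.getLast?.map (·.1)

lemma pmB_addLast_concat (init : List (String × List String)) (n : String) (hs : List String)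
    (h : String) : pmB_addLast (init ++ [(n, hs)]) h = init ++ [(n, hs ++ [h])] := by
  induction init with
  | nil => rfl
  | cons b rest ih =>
    cases rest with
    | nil => simp [pmB_addLast]
    | cons b' rest' => simp [pmB_addLast] at ih ⊢; exact ih

lemma pmAssemble_concat (r : PySem.Dict String (PySem.Dict String String))
    (bs : List (String × List String)) (b : String × List String) :
    pmAssemble r (bs ++ [b]) = (pmAssemble r bs).insert b.1 (pmB_mkHeaders b.2) := by
  simp [pmAssemble, List.foldl_append]

lemma pmLastName_concat (bs : List (String × List String)) (b : String × List String) :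
    pmLastName (bs ++ [b]) = some b.1 := by
  simp [pmLastName]

lemma pmB_mkHeaders_concat (hs : List String) (h : String) :
    pmB_mkHeaders (hs ++ [h]) =
      match pmPartition h with
      | none => pmB_mkHeaders hs
      | some (k, v) => (pmB_mkHeaders hs).insert (PySem.Str.lower (PySem.Str.strip k))
          (PySem.Str.strip v) := by
  simp [pmB_mkHeaders, List.foldl_append]

lemma dict_insert_insert_self {κ ν : Type} [BEq κ] [LawfulBEq κ]
    (d : PySem.Dict κ ν) (k : κ) (v w : ν) :
    (d.insert k v).insert k w = d.insert k w := by
  have hrw : ∀ (D : PySem.Dict κ ν), D.contains k = true →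
      D.insert k w = ⟨D.items.map (fun p => if p.1 == k then (k, w) else p)⟩ := by
    intro D hD; simp [PySem.Dict.insert, hD]
  have hck : (d.insert k v).contains k = true := by
    rw [PySem.Dict.contains_insert]; simp
  rw [hrw _ hck]
  by_cases hc : d.contains k = true
  · apply PySem.Dict.ext
    rw [hrw d hc]
    simp only [PySem.Dict.insert, hc, if_true, List.map_map]
    apply List.map_congr_left
    intro p _
    by_cases hp : p.1 == k <;> simp [Function.comp, hp]
  · have hall : ∀ p ∈ d.items, (p.1 == k) = false := by
      intro p hp
      by_contra hne
      exact hc (List.any_eq_true.mpr ⟨p, hp, by simpa using hne⟩)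
    apply PySem.Dict.ext
    simp only [PySem.Dict.insert, hc]
    have h1 : List.map (fun p => if (p.1 == k) = true then (k, w) else p) d.items = d.items := by
      apply (List.map_congr_left ?_).trans d.items.map_id
      intro p hp; simp [hall p hp]
    simp [h1]

lemma dict_modify_insert_self {κ ν : Type} [BEq κ] [LawfulBEq κ]
    (d : PySem.Dict κ ν) (k : κ) (v : ν) (d0 : ν) (f : ν → ν) :
    (d.insert k v).modify k d0 f = d.insert k (f v) := by
  rw [PySem.Dict.modify, PySem.Dict.getD_insert_self]
  exact dict_insert_insert_self d k v (f v)

lemma pm_step_inv (raw : String)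
    (st : PySem.Dict String (PySem.Dict String String) × Option String)
    (blocks : List (String × List String))
    (h1 : st.1 = pmAssemble PySem.Dict.empty blocks) (h2 : st.2 = pmLastName blocks) :
    (pmA_step st raw).1 = pmAssemble PySem.Dict.empty (pmB_blockStep blocks raw) ∧
    (pmA_step st raw).2 = pmLastName (pmB_blockStep blocks raw) := by
  obtain ⟨r, c⟩ := st
  simp only at h1 h2
  subst h1 h2
  unfold pmA_step pmB_blockStep
  by_cases hb : PySem.Str.strip raw = ""
  · simp [hb]
  · by_cases hi : pmIndented raw = true
    · rw [if_neg hb, if_neg hb, if_pos hi, if_pos hi]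
      rcases List.eq_nil_or_concat blocks with hnil | ⟨init, b, hbk⟩
      · subst hnil
        simp [pmLastName, pmB_addLast]
      · obtain ⟨n, hs⟩ := b
        rw [List.concat_eq_append] at hbk
        subst hbk
        rw [pmB_addLast_concat]
        have hlast : pmLastName (init ++ [(n, hs)]) = some n := pmLastName_concat _ _
        cases hp : pmPartition (PySem.Str.strip raw) with
        | none =>
          refine ⟨?_, ?_⟩
          · simp [hlast, hp, pmAssemble_concat, pmB_mkHeaders_concat]
          · simp [hlast, pmLastName_concat]
        | some kv =>
          obtain ⟨kk, vv⟩ := kv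
          refine ⟨?_, ?_⟩
          · simp [hlast, hp, pmAssemble_concat, pmB_mkHeaders_concat, dict_modify_insert_self]
          · simp [hlast, pmLastName_concat]
    · rw [if_neg hb, if_neg hb, if_neg hi, if_neg hi]
      refine ⟨?_, ?_⟩
      · rw [pmAssemble_concat]
        rfl
      · rw [pmLastName_concat]

lemma pm_fold_inv (lines : List String)
    (st : PySem.Dict String (PySem.Dict String String) × Option String)
    (blocks : List (String × List String))
    (h1 : st.1 = pmAssemble PySem.Dict.empty blocks) (h2 : st.2 = pmLastName blocks) :
    (lines.foldl pmA_step st).1 = pmAssemble PySem.Dict.empty (lines.foldl pmB_blockStep blocks) ∧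
    (lines.foldl pmA_step st).2 = pmLastName (lines.foldl pmB_blockStep blocks) := by
  induction lines generalizing st blocks with
  | nil => exact ⟨h1, h2⟩
  | cons l rest ih =>
    obtain ⟨g1, g2⟩ := pm_step_inv l st blocks h1 h2
    exact ih _ _ g1 g2

-- ===== VERDICT (by name: the statement is the Claim_ definition above) =====
theorem parse_headers_manifest_spec : Claim_equal_parse_headers_manifest := by
  intro text _ _
  unfold Spec_parse_headers_manifest parse_headers_manifest parse_headers_manifest_alt
  obtain ⟨g1, _⟩ := pm_fold_inv (PySem.Str.splitlines text) (PySem.Dict.empty, none) []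
    rfl rfl
  simp only []
  rw [g1]
  rfl
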